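-- pv_equiv track=rewrite | github.com/swolix/ebyst | src/ebyst/stapl/aca.py | _get_bytes
-- ===== SOURCE A (Python) =====
-- def _get_6bits(compressed: str):
--     for c in compressed:
--         c = ord(c)
--         if c >= 0x30 and c <= 0x39:
--             yield c - 0x30
--         elif c >= 0x41 and c <= 0x5a:
--             yield c - 0x41 + 10
--         elif c >= 0x61 and c <= 0x7a:
--             yield c - 0x61 + 36
--         elif c == 0x5f:
--             yield 0x3e
--         elif c == 0x40:
--             yield 0x3f
--         elif c in (0x08, 0x0a, 0x0d, 0x20):
--             pass
--         else:
--             raise ValueError(f"Invalid character in compressed stream (0x{c:02x})")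
--
-- def _get_bytes(compressed: str):
--     it = _get_6bits(compressed)
--     try:
--         while True:
--             a = next(it)
--             b = next(it)
--             yield a | ((b & 0x03) << 6)
--             c = next(it)
--             yield ((b & 0x3c) >> 2) | ((c & 0x0f) << 4)
--             d = next(it)
--             yield ((c & 0x30) >> 4) | (d << 2)
--     except StopIteration:
--         pass
-- ===== SOURCE B (Python) =====
-- def _get_bytes(compressed: str):
--     acc = 0
--     nbits = 0
--     for ch in compressed:
--         c = ord(ch)
--         if 0x30 <= c <= 0x39:
--             v = c - 0x30
--         elif 0x41 <= c <= 0x5a: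
--             v = c - 0x37
--         elif 0x61 <= c <= 0x7a:
--             v = c - 0x3d
--         elif c == 0x5f:
--             v = 0x3e
--         elif c == 0x40:
--             v = 0x3f
--         elif c in (0x08, 0x0a, 0x0d, 0x20):
--             continue
--         else:
--             raise ValueError(f"Invalid character in compressed stream (0x{c:02x})")
--         acc |= v << nbits
--         nbits += 6
--         while nbits >= 8:
--             yield acc & 0xFF
--             acc >>= 8
--             nbits -= 8
-- ===== Notes on version B (the rewrite author's own statement) =====
-- stated objective: simpler
-- what changed: Replaces the explicit 4-sixbit-to-3-byte grouping (four next() calls with per-position bit formulas) by a single streaming little-endian bit accumulator: each decoded 6-bit value is ORed in at the current bit offset and full bytes are emitted while at least 8 bits are buffered.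
import Mathlib
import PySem

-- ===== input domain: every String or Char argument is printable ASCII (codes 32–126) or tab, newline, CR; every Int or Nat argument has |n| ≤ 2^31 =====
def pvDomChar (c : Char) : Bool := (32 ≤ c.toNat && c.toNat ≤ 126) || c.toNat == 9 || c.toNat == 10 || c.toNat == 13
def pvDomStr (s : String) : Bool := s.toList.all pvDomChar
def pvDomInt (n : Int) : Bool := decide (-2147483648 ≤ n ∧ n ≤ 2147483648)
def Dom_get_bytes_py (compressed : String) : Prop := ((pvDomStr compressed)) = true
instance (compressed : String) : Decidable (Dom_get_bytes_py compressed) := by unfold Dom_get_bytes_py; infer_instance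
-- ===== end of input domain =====

-- B replaces A's explicit 4-sixbit-to-3-byte grouping by one streaming little-endian
-- bit accumulator (a simpler single pass); return values agree wherever A returns
-- (Pre_ excludes exactly the invalid characters on which both Pythons raise ValueError).

-- ===== PORT A =====
-- _get_6bits: decode the stream to 6-bit values (an invalid character raises
-- ValueError in Python; such inputs are outside Pre_, the port stops there)
def sixbitsA : List Char → List Int
  | [] => []
  | ch :: rest =>
    let c : Int := ch.toNat
    if 0x30 ≤ c ∧ c ≤ 0x39 then (c - 0x30) :: sixbitsA rest
    else if 0x41 ≤ c ∧ c ≤ 0x5a then (c - 0x41 + 10) :: sixbitsA rest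
    else if 0x61 ≤ c ∧ c ≤ 0x7a then (c - 0x61 + 36) :: sixbitsA rest
    else if c = 0x5f then (0x3e : Int) :: sixbitsA rest
    else if c = 0x40 then (0x3f : Int) :: sixbitsA rest
    else if c = 0x08 ∨ c = 0x0a ∨ c = 0x0d ∨ c = 0x20 then sixbitsA rest
    else []  -- raise ValueError; excluded by Pre_

-- the while-True/StopIteration loop of _get_bytes: consume 4 sixbits per 3 output
-- bytes; a partial group yields the bytes completed before StopIteration
def groupsA : List Int → List Int
  | a :: b :: c :: d :: rest =>
      (PySem.Int.bor a ((PySem.Int.band b 0x03) <<< (6 : Nat))) ::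
      (PySem.Int.bor ((PySem.Int.band b 0x3c) >>> (2 : Nat)) ((PySem.Int.band c 0x0f) <<< (4 : Nat))) ::
      (PySem.Int.bor ((PySem.Int.band c 0x30) >>> (4 : Nat)) (d <<< (2 : Nat))) :: groupsA rest
  | [a, b, c] =>
      [PySem.Int.bor a ((PySem.Int.band b 0x03) <<< (6 : Nat)),
       PySem.Int.bor ((PySem.Int.band b 0x3c) >>> (2 : Nat)) ((PySem.Int.band c 0x0f) <<< (4 : Nat))]
  | [a, b] => [PySem.Int.bor a ((PySem.Int.band b 0x03) <<< (6 : Nat))]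
  | [_] => []
  | [] => []

def get_bytes_py (compressed : String) : List Int := groupsA (sixbitsA compressed.toList)

-- ===== PORT B =====
-- the inner `while nbits >= 8` loop (nbits is never negative in Python, so Nat)
def drainB (acc : Int) (nbits : Nat) : List Int × Int × Nat :=
  if 8 ≤ nbits then
    let out : Int := PySem.Int.band acc 0xFF
    let r := drainB (acc >>> (8 : Nat)) (nbits - 8)
    (out :: r.1, r.2)
  else ([], acc, nbits)

-- acc |= v << nbits; nbits += 6; then drain full bytes
def pushB (st : List Int × Int × Nat) (v : Int) : List Int × Int × Nat :=
  let acc : Int := PySem.Int.bor st.2.1 (v <<< st.2.2)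
  let r := drainB acc (st.2.2 + 6)
  (st.1 ++ r.1, r.2)

-- loop body: decode one character inline (invalid raises in Python; outside Pre_)
def stepB (st : List Int × Int × Nat) (ch : Char) : List Int × Int × Nat :=
  let c : Int := ch.toNat
  if 0x30 ≤ c ∧ c ≤ 0x39 then pushB st (c - 0x30)
  else if 0x41 ≤ c ∧ c ≤ 0x5a then pushB st (c - 0x37)
  else if 0x61 ≤ c ∧ c ≤ 0x7a then pushB st (c - 0x3d)
  else if c = 0x5f then pushB st 0x3e
  else if c = 0x40 then pushB st 0x3f
  else st  -- skip characters; invalid characters (ValueError) are outside Pre_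

def get_bytes_py_alt (compressed : String) : List Int :=
  (compressed.toList.foldl stepB ([], 0, 0)).1

-- ===== PRECONDITION & SPEC =====
-- Pre_ excludes exactly the inputs containing a character outside the coding
-- alphabet and skip set, on which Python A (and B) raise ValueError.
def validCharB (ch : Char) : Bool :=
  (0x30 ≤ ch.toNat && ch.toNat ≤ 0x39) || (0x41 ≤ ch.toNat && ch.toNat ≤ 0x5a) ||
  (0x61 ≤ ch.toNat && ch.toNat ≤ 0x7a) || ch.toNat == 0x5f || ch.toNat == 0x40 ||
  ch.toNat == 0x08 || ch.toNat == 0x0a || ch.toNat == 0x0d || ch.toNat == 0x20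
def Pre_get_bytes_py (compressed : String) : Prop :=
  compressed.toList.all validCharB = true
instance (compressed : String) : Decidable (Pre_get_bytes_py compressed) := by
  unfold Pre_get_bytes_py; infer_instance

def pvWitness_get_bytes_py : String := "Hello_World 42@"

def Spec_get_bytes_py (compressed : String) (out : List Int) : Prop := out = get_bytes_py_alt compressed
instance (compressed : String) (out : List Int) : Decidable (Spec_get_bytes_py compressed out) := by unfold Spec_get_bytes_py; infer_instance

-- ===== CLAIM (what is proved, stated in full; the proofs are below) =====
def Claim_equal_get_bytes_py : Prop := ∀ (compressed : String), Dom_get_bytes_py compressed → Pre_get_bytes_py compressed → Spec_get_bytes_py compressed (get_bytes_py compressed)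

-- ===== LEMMAS AND PROOFS =====

-- sixbits are in [0, 64) in every branch
theorem sixbitsA_bounds : ∀ cs : List Char, ∀ x ∈ sixbitsA cs, 0 ≤ x ∧ x < 64 := by
  intro cs
  induction cs with
  | nil => simp [sixbitsA]
  | cons ch rest ih =>
    intro x hx
    simp only [sixbitsA] at hx
    split_ifs at hx with h1 h2 h3 h4 h5 h6 <;>
      first
      | (rcases List.mem_cons.mp hx with h | h
         · subst h; omega
         · exact ih x h)
      | exact ih x hx
      | simp at hx

-- under Pre_, B's char-level fold equals the sixbit-level fold of pushB
theorem foldl_stepB_eq_pushB : ∀ (cs : List Char) (st : List Int × Int × Nat),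
    (∀ ch ∈ cs, validCharB ch = true) →
    cs.foldl stepB st = (sixbitsA cs).foldl pushB st := by
  intro cs
  induction cs with
  | nil => intro st _; simp [sixbitsA]
  | cons ch rest ih =>
    intro st hpre
    have hch := hpre ch List.mem_cons_self
    have hrest := fun c hc => hpre c (List.mem_cons_of_mem _ hc)
    simp only [List.foldl, sixbitsA, stepB]
    split_ifs with h1 h2 h3 h4 h5 h6
    · simp only [List.foldl]; exact ih _ hrest
    · have e : (ch.toNat : Int) - 0x37 = (ch.toNat : Int) - 0x41 + 10 := by ring
      rw [e]; simp only [List.foldl]; exact ih _ hrest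
    · have e : (ch.toNat : Int) - 0x3d = (ch.toNat : Int) - 0x61 + 36 := by ring
      rw [e]; simp only [List.foldl]; exact ih _ hrest
    · simp only [List.foldl]; exact ih _ hrest
    · simp only [List.foldl]; exact ih _ hrest
    · exact ih _ hrest
    · exfalso; simp [validCharB] at hch; omega

-- byte/carry identities for 6-bit values, verified exhaustively over Fin 64
theorem key0 : ∀ a : Fin 64, PySem.Int.bor 0 (a : Int) = (a : Int) := by decide
theorem key1 : ∀ a b : Fin 64,
    PySem.Int.band (PySem.Int.bor (a : Int) ((b : Int) <<< (6 : Nat))) 0xFF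
      = PySem.Int.bor (a : Int) ((PySem.Int.band (b : Int) 0x03) <<< (6 : Nat)) := by decide
theorem key2 : ∀ a b : Fin 64,
    (PySem.Int.bor (a : Int) ((b : Int) <<< (6 : Nat))) >>> (8 : Nat) = (b : Int) >>> (2 : Nat) := by decide
theorem key3 : ∀ b c : Fin 64,
    PySem.Int.band (PySem.Int.bor ((b : Int) >>> (2 : Nat)) ((c : Int) <<< (4 : Nat))) 0xFF
      = PySem.Int.bor ((PySem.Int.band (b : Int) 0x3c) >>> (2 : Nat)) ((PySem.Int.band (c : Int) 0x0f) <<< (4 : Nat)) := by decide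
theorem key4 : ∀ b c : Fin 64,
    (PySem.Int.bor ((b : Int) >>> (2 : Nat)) ((c : Int) <<< (4 : Nat))) >>> (8 : Nat) = (c : Int) >>> (4 : Nat) := by decide
theorem key5 : ∀ c d : Fin 64,
    PySem.Int.band (PySem.Int.bor ((c : Int) >>> (4 : Nat)) ((d : Int) <<< (2 : Nat))) 0xFF
      = PySem.Int.bor ((PySem.Int.band (c : Int) 0x30) >>> (4 : Nat)) ((d : Int) <<< (2 : Nat)) := by decide
theorem key6 : ∀ c d : Fin 64,
    (PySem.Int.bor ((c : Int) >>> (4 : Nat)) ((d : Int) <<< (2 : Nat))) >>> (8 : Nat) = 0 := by decide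

theorem toFin (x : Int) (h0 : 0 ≤ x) (h : x < 64) : ∃ f : Fin 64, x = (f : Int) :=
  ⟨⟨x.toNat, by omega⟩, by simp; omega⟩

-- Int-level versions of the identities, applicable under bound hypotheses
theorem key0i (a : Int) (ha : 0 ≤ a ∧ a < 64) : PySem.Int.bor 0 a = a := by
  obtain ⟨fa, rfl⟩ := toFin a ha.1 ha.2; exact key0 fa
theorem key1i (a b : Int) (ha : 0 ≤ a ∧ a < 64) (hb : 0 ≤ b ∧ b < 64) :
    PySem.Int.band (PySem.Int.bor a (b <<< (6 : Nat))) 0xFF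
      = PySem.Int.bor a ((PySem.Int.band b 0x03) <<< (6 : Nat)) := by
  obtain ⟨fa, rfl⟩ := toFin a ha.1 ha.2; obtain ⟨fb, rfl⟩ := toFin b hb.1 hb.2
  exact key1 fa fb
theorem key2i (a b : Int) (ha : 0 ≤ a ∧ a < 64) (hb : 0 ≤ b ∧ b < 64) :
    (PySem.Int.bor a (b <<< (6 : Nat))) >>> (8 : Nat) = b >>> (2 : Nat) := by
  obtain ⟨fa, rfl⟩ := toFin a ha.1 ha.2; obtain ⟨fb, rfl⟩ := toFin b hb.1 hb.2
  exact key2 fa fb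
theorem key3i (b c : Int) (hb : 0 ≤ b ∧ b < 64) (hc : 0 ≤ c ∧ c < 64) :
    PySem.Int.band (PySem.Int.bor (b >>> (2 : Nat)) (c <<< (4 : Nat))) 0xFF
      = PySem.Int.bor ((PySem.Int.band b 0x3c) >>> (2 : Nat)) ((PySem.Int.band c 0x0f) <<< (4 : Nat)) := by
  obtain ⟨fb, rfl⟩ := toFin b hb.1 hb.2; obtain ⟨fc, rfl⟩ := toFin c hc.1 hc.2
  exact key3 fb fc
theorem key4i (b c : Int) (hb : 0 ≤ b ∧ b < 64) (hc : 0 ≤ c ∧ c < 64) :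
    (PySem.Int.bor (b >>> (2 : Nat)) (c <<< (4 : Nat))) >>> (8 : Nat) = c >>> (4 : Nat) := by
  obtain ⟨fb, rfl⟩ := toFin b hb.1 hb.2; obtain ⟨fc, rfl⟩ := toFin c hc.1 hc.2
  exact key4 fb fc
theorem key5i (c d : Int) (hc : 0 ≤ c ∧ c < 64) (hd : 0 ≤ d ∧ d < 64) :
    PySem.Int.band (PySem.Int.bor (c >>> (4 : Nat)) (d <<< (2 : Nat))) 0xFF
      = PySem.Int.bor ((PySem.Int.band c 0x30) >>> (4 : Nat)) (d <<< (2 : Nat)) := by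
  obtain ⟨fc, rfl⟩ := toFin c hc.1 hc.2; obtain ⟨fd, rfl⟩ := toFin d hd.1 hd.2
  exact key5 fc fd
theorem key6i (c d : Int) (hc : 0 ≤ c ∧ c < 64) (hd : 0 ≤ d ∧ d < 64) :
    (PySem.Int.bor (c >>> (4 : Nat)) (d <<< (2 : Nat))) >>> (8 : Nat) = 0 := by
  obtain ⟨fc, rfl⟩ := toFin c hc.1 hc.2; obtain ⟨fd, rfl⟩ := toFin d hd.1 hd.2
  exact key6 fc fd

-- one group of four sixbits returns the state to (·, 0, 0) and emits A's bytes
theorem push1 (out : List Int) (a : Int) (ha : 0 ≤ a ∧ a < 64) :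
    pushB (out, 0, 0) a = (out, a, 6) := by
  simp [pushB, drainB, key0i a ha]

theorem push2 (out : List Int) (a b : Int) (ha : 0 ≤ a ∧ a < 64) (hb : 0 ≤ b ∧ b < 64) :
    pushB (pushB (out, 0, 0) a) b
      = (out ++ [PySem.Int.bor a ((PySem.Int.band b 0x03) <<< (6 : Nat))],
         b >>> (2 : Nat), 4) := by
  rw [push1 out a ha]
  simp [pushB, drainB]
  exact ⟨key1i a b ha hb, key2i a b ha hb⟩

theorem push3 (out : List Int) (a b c : Int) (ha : 0 ≤ a ∧ a < 64) (hb : 0 ≤ b ∧ b < 64)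
    (hc : 0 ≤ c ∧ c < 64) :
    pushB (pushB (pushB (out, 0, 0) a) b) c
      = (out ++ [PySem.Int.bor a ((PySem.Int.band b 0x03) <<< (6 : Nat)),
                 PySem.Int.bor ((PySem.Int.band b 0x3c) >>> (2 : Nat)) ((PySem.Int.band c 0x0f) <<< (4 : Nat))],
         c >>> (4 : Nat), 2) := by
  rw [push2 out a b ha hb]
  simp [pushB, drainB]
  exact ⟨key3i b c hb hc, key4i b c hb hc⟩

theorem push4 (out : List Int) (a b c d : Int) (ha : 0 ≤ a ∧ a < 64) (hb : 0 ≤ b ∧ b < 64)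
    (hc : 0 ≤ c ∧ c < 64) (hd : 0 ≤ d ∧ d < 64) :
    pushB (pushB (pushB (pushB (out, 0, 0) a) b) c) d
      = (out ++ [PySem.Int.bor a ((PySem.Int.band b 0x03) <<< (6 : Nat)),
                 PySem.Int.bor ((PySem.Int.band b 0x3c) >>> (2 : Nat)) ((PySem.Int.band c 0x0f) <<< (4 : Nat)),
                 PySem.Int.bor ((PySem.Int.band c 0x30) >>> (4 : Nat)) (d <<< (2 : Nat))], 0, 0) := by
  rw [push3 out a b c ha hb hc]
  simp [pushB, drainB]
  exact ⟨key5i c d hc hd, key6i c d hc hd⟩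

-- folding pushB from the group boundary over bounded sixbits appends A's grouping
theorem foldl_pushB_groups : ∀ (v : List Int) (out : List Int),
    (∀ x ∈ v, 0 ≤ x ∧ x < 64) →
    (v.foldl pushB (out, 0, 0)).1 = out ++ groupsA v := by
  intro v
  induction v using groupsA.induct with
  | case1 a b c d rest ih =>
    intro out hb
    simp only [List.foldl]
    rw [push4 out a b c d (hb a (by simp)) (hb b (by simp)) (hb c (by simp)) (hb d (by simp)),
        ih (out ++ _) (fun x hx => hb x (by simp [hx]))]
    simp [groupsA]
  | case2 a b c =>
    intro out hb
    simp only [List.foldl]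
    rw [push3 out a b c (hb a (by simp)) (hb b (by simp)) (hb c (by simp))]
    simp [groupsA]
  | case3 a b =>
    intro out hb
    simp only [List.foldl]
    rw [push2 out a b (hb a (by simp)) (hb b (by simp))]
    simp [groupsA]
  | case4 a =>
    intro out hb
    simp only [List.foldl]
    rw [push1 out a (hb a (by simp))]
    simp [groupsA]
  | case5 =>
    intro out _
    simp [groupsA]

-- ===== VERDICT (by name: the statement is the Claim_ definition above) =====
theorem get_bytes_py_spec : Claim_equal_get_bytes_py := by
  intro compressed _ hpre
  unfold Spec_get_bytes_py get_bytes_py get_bytes_py_alt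
  have hall : ∀ ch ∈ compressed.toList, validCharB ch = true :=
    List.all_eq_true.mp hpre
  rw [foldl_stepB_eq_pushB compressed.toList ([], 0, 0) hall,
      foldl_pushB_groups _ [] (sixbitsA_bounds compressed.toList)]
  simp
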